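-- pv_equiv track=rewrite | github.com/rlguswn/solved-coding-problem | programmers/python/Lv2/퍼즐게임챌린지.py | calc
-- ===== SOURCE A (Python) =====
-- def calc(dif, time, level):
--     total = 0
--     time_prev = 0
--     for i in range(len(dif)):
--         if level >= dif[i]:
--             total += time[i]
--         else:
--             r = dif[i] - level
--             total = total + (time[i]*(r+1)) + (time_prev*r)
--         time_prev = time[i]
--     return total
-- ===== SOURCE B (Python) =====
-- def calc(dif, time, level):
--     r = [max(d - level, 0) for d in dif]
--     w = [1 + a + b for a, b in zip(r, r[1:] + [0])]
--     return sum(t * c for t, c in zip(time, w))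
-- ===== Notes on version B (the rewrite author's own statement) =====
-- stated objective: alternative
-- what changed: Replaces A's stateful prev-threading if/else accumulator with a weight-per-time-slot formulation: each time[i] is multiplied exactly once by the precomputed weight 1 + max(dif[i]-level,0) + max(dif[i+1]-level,0) built from consecutive difficulty pairs, so no running state and no branch remains.
import Mathlib
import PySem

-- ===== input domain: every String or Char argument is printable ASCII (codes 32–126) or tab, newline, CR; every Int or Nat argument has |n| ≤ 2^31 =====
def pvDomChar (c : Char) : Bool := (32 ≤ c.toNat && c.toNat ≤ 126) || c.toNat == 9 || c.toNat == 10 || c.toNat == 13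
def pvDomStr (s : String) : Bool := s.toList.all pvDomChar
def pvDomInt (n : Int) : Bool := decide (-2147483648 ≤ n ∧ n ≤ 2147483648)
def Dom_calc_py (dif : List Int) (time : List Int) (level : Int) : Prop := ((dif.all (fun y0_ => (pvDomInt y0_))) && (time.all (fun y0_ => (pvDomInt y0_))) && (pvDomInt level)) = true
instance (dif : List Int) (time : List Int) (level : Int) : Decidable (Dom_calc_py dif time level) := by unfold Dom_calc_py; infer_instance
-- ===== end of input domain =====

-- B drops A's prev-threading accumulator entirely: it precomputes a weight per time slot,
-- 1 + max(dif[i]-level,0) + max(dif[i+1]-level,0), and returns the weighted sum (objective: alternative).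

-- ===== PORT A =====
def calc_py (dif : List Int) (time : List Int) (level : Int) : Int :=
  ((PySem.List.pyRange 0 (PySem.List.len dif) 1).foldl
    (fun (s : Int × Int) i =>
      let di := PySem.List.pyGetD dif i 0
      let ti := PySem.List.pyGetD time i 0
      (if level ≥ di then s.1 + ti
       else s.1 + ti * ((di - level) + 1) + s.2 * (di - level), ti))
    (0, 0)).1

-- ===== PORT B =====
-- r[1:] is the nonneg slice from 1, exactly List.drop 1 for a list.
def calc_py_alt (dif : List Int) (time : List Int) (level : Int) : Int :=
  let r := dif.map (fun d => max (d - level) 0)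
  let w := (r.zip (r.drop 1 ++ [0])).map (fun q => 1 + q.1 + q.2)
  ((time.zip w).map (fun q => q.1 * q.2)).sum

-- ===== PRECONDITION & SPEC =====
-- Pre_ excludes exactly the inputs where A raises IndexError: time shorter than dif.
def Pre_calc_py (dif : List Int) (time : List Int) (level : Int) : Prop :=
  dif.length ≤ time.length
instance (dif : List Int) (time : List Int) (level : Int) : Decidable (Pre_calc_py dif time level) := by unfold Pre_calc_py; infer_instance
def pvWitness_calc_py : List Int × List Int × Int := ([1, 5], [2, 3], 3)

def Spec_calc_py (dif : List Int) (time : List Int) (level : Int) (out : Int) : Prop := out = calc_py_alt dif time level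
instance (dif : List Int) (time : List Int) (level : Int) (out : Int) : Decidable (Spec_calc_py dif time level out) := by unfold Spec_calc_py; infer_instance

-- ===== CLAIM (what is proved, stated in full; the proofs are below) =====
def Claim_equal_calc_py : Prop := ∀ (dif : List Int) (time : List Int) (level : Int), Dom_calc_py dif time level → Pre_calc_py dif time level → Spec_calc_py dif time level (calc_py dif time level)

-- ===== LEMMAS AND PROOFS =====

-- A's penalty contribution, threading the previous time through the pair list
def pvPen (level : Int) : List (Int × Int) → Int → Int
  | [], _ => 0
  | (d, t) :: r, p => (if d > level then (d - level) * (t + p) else 0) + pvPen level r t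

-- weight of the head pair (0 for the empty list)
def pvHeadR (level : Int) : List (Int × Int) → Int
  | [] => 0
  | (d, _) :: _ => max (d - level) 0

-- B's weighted sum, as a lookahead recursion over the pair list
def pvW (level : Int) : List (Int × Int) → Int
  | [] => 0
  | (d, t) :: rest => t * (1 + max (d - level) 0 + pvHeadR level rest) + pvW level rest

-- A's loop over the zipped pairs, fully characterised
theorem pvFoldG (level : Int) :
    ∀ (xs : List (Int × Int)) (total prev : Int),
      (xs.foldl (fun (s : Int × Int) q =>
        (if level ≥ q.1 then s.1 + q.2
         else s.1 + q.2 * ((q.1 - level) + 1) + s.2 * (q.1 - level), q.2)) (total, prev)).1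
      = total + (xs.map Prod.snd).sum + pvPen level xs prev := by
  intro xs
  induction xs with
  | nil => intro total prev; simp [pvPen]
  | cons q r ih =>
    intro total prev
    obtain ⟨d, t⟩ := q
    simp only [List.foldl_cons, List.map_cons, List.sum_cons, pvPen, ih]
    by_cases h : level ≥ d
    · rw [if_pos h, if_neg (by omega)]; ring
    · rw [if_neg h, if_pos (by omega)]; ring

-- base sum plus A's penalties equals B's lookahead weighting (plus the phantom head term)
theorem pvW_eq (level : Int) :
    ∀ (xs : List (Int × Int)) (p : Int),
      (xs.map Prod.snd).sum + pvPen level xs p = p * pvHeadR level xs + pvW level xs := by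
  intro xs
  induction xs with
  | nil => intro p; simp [pvPen, pvHeadR, pvW]
  | cons q r ih =>
    intro p
    obtain ⟨d, t⟩ := q
    have h : (if d > level then (d - level) * (t + p) else 0) = max (d - level) 0 * (t + p) := by
      by_cases hd : d > level
      · rw [if_pos hd, max_eq_left (by omega)]
      · rw [if_neg hd, max_eq_right (by omega)]; ring
    have hh : pvHeadR level ((d, t) :: r) = max (d - level) 0 := rfl
    simp only [List.map_cons, List.sum_cons, pvPen, pvW, h, hh]
    linarith [ih t]

-- B's port computes pvW of the zipped list whenever time is long enough
theorem pvAlt_eq (level : Int) :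
    ∀ (dif time : List Int), dif.length ≤ time.length →
      calc_py_alt dif time level = pvW level (dif.zip time) := by
  intro dif
  induction dif with
  | nil => intro time h; simp [calc_py_alt, pvW]
  | cons d dif' ih =>
    intro time h
    cases time with
    | nil => simp at h
    | cons t time' =>
      have h' : dif'.length ≤ time'.length := by simpa using h
      cases dif' with
      | nil =>
        simp [calc_py_alt, pvW, pvHeadR]
      | cons d2 dif'' =>
        cases time' with
        | nil => simp at h'
        | cons t2 time'' =>
          have hih := ih (t2 :: time'') h'
          have hR : pvW level ((d, t) :: (d2, t2) :: (dif''.zip time''))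
              = t * (1 + max (d - level) 0 + max (d2 - level) 0)
                + pvW level ((d2, t2) :: (dif''.zip time'')) := rfl
          simp only [calc_py_alt] at hih ⊢
          simp only [List.map_cons, List.drop_succ_cons, List.drop_zero, List.cons_append,
            List.zip_cons_cons, List.sum_cons] at hih ⊢
          rw [hR]
          linarith [hih]

-- A's loop rewritten over the zipped list (indexing is total under Pre_)
theorem pvLoopEq (dif time : List Int) (level : Int) (h : dif.length ≤ time.length) :
    calc_py dif time level
      = ((dif.zip time).foldl (fun (s : Int × Int) q =>
          (if level ≥ q.1 then s.1 + q.2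
           else s.1 + q.2 * ((q.1 - level) + 1) + s.2 * (q.1 - level), q.2)) (0, 0)).1 := by
  unfold calc_py
  have hlen : (dif.zip time).length = dif.length := by simp [List.length_zip]; omega
  have hb : PySem.List.len dif = ((dif.zip time).length : Int) := by
    simp [PySem.List.len_eq, hlen]
  rw [hb]
  have hcongr : (PySem.List.pyRange 0 ((dif.zip time).length : Int) 1).foldl
      (fun (s : Int × Int) i =>
        let di := PySem.List.pyGetD dif i 0
        let ti := PySem.List.pyGetD time i 0
        (if level ≥ di then s.1 + ti
         else s.1 + ti * ((di - level) + 1) + s.2 * (di - level), ti)) (0, 0)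
      = (PySem.List.pyRange 0 ((dif.zip time).length : Int) 1).foldl
      (fun (s : Int × Int) i =>
        (fun (s : Int × Int) (q : Int × Int) =>
          (if level ≥ q.1 then s.1 + q.2
           else s.1 + q.2 * ((q.1 - level) + 1) + s.2 * (q.1 - level), q.2)) s
          (PySem.List.pyGetD (dif.zip time) i (0, 0))) (0, 0) := by
    apply PySem.List.foldl_congr_mem
    intro a x hx
    rw [PySem.List.mem_pyRange_one] at hx
    have h0 : 0 ≤ x := hx.1
    have h1 : x < ((dif.zip time).length : Int) := hx.2
    have h1d : x < (dif.length : Int) := by omega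
    have h1t : x < (time.length : Int) := by omega
    rw [PySem.List.pyGetD_eq_getElem _ _ h0 (by simpa using h1d),
        PySem.List.pyGetD_eq_getElem _ _ h0 (by simpa using h1t),
        PySem.List.pyGetD_eq_getElem _ _ h0 (by simp; omega)]
    simp [List.getElem_zip]
  rw [hcongr]
  exact congrArg Prod.fst (PySem.List.foldl_pyRange_zero_pyGetD' (dif.zip time) (0, 0)
    (fun (s : Int × Int) (q : Int × Int) =>
      (if level ≥ q.1 then s.1 + q.2
       else s.1 + q.2 * ((q.1 - level) + 1) + s.2 * (q.1 - level), q.2)) (0, 0))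

-- ===== VERDICT (by name: the statements are the Claim_ definitions above) =====
theorem calc_py_spec : Claim_equal_calc_py := by
  intro dif time level _ hpre
  unfold Spec_calc_py
  rw [pvLoopEq dif time level hpre, pvFoldG, pvAlt_eq level dif time hpre]
  have := pvW_eq level (dif.zip time) 0
  linarith
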